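-- pv_equiv track=rewrite | github.com/envyaims/Pantheon-CMIMC-2024 | death-run/student.py | remove_solitary_edges
-- ===== SOURCE A (Python) =====
-- import copy
--
-- def remove_solitary_edges(edge_list):
--     out_degree = {}
--     out_edges = {}
--     for u, v, w in edge_list:
--         out_edges[u] = out_edges.get(u, list())
--         out_edges[u].append(tuple([v, w]))
--         out_degree[u] = out_degree.get(u, 0) + 1
--         out_degree[v] = out_degree.get(v, 0)
--
--     filtered_edges = []
--     for edge in edge_list:
--         if out_degree[edge[0]] == 2:
--             this_out_edges = out_edges[edge[0]]
--             min_edge = min(this_out_edges, key=lambda x: x[1])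
--             max_edge = max(this_out_edges, key=lambda x: x[1])
--             if min_edge[1] == max_edge[1]:
--                 filtered_edges.append(tuple([edge[0], edge[1], min_edge[1] + 2]))
--             elif min_edge[0] == edge[1]:
--                 filtered_edges.append(tuple([edge[0], edge[1], min(min_edge[1] + 4, max_edge[1])]))
--             elif max_edge[0] == edge[1]:
--                 filtered_edges.append(tuple([edge[0], edge[1], max_edge[1] + 2]))
--         elif out_degree[edge[0]] == 3:
--             this_out_edges = copy.deepcopy(out_edges[edge[0]])
--             min_edge = min(this_out_edges, key=lambda x: x[1])
--             this_out_edges.remove(min_edge)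
--             max_edge = min(this_out_edges, key=lambda x: x[1])
--             if min_edge[1] == max_edge[1] == edge[2]:
--                 filtered_edges.append(tuple([edge[0], edge[1], min_edge[1] + 1]))
--             elif min_edge[0] == edge[1]:
--                 filtered_edges.append(tuple([edge[0], edge[1], min(min_edge[1] + 3, max_edge[1])]))
--             elif max_edge[0] == edge[1]:
--                 filtered_edges.append(tuple([edge[0], edge[1], max_edge[1] + 1]))
--             else:
--                 filtered_edges.append(tuple([edge[0], edge[1], edge[2] + 1]))
--         elif out_degree[edge[0]] > 1:
--             filtered_edges.append(edge)
--     return filtered_edges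
-- ===== SOURCE B (Python) =====
-- def remove_solitary_edges(edge_list):
--     # group out-edges by source (one pass)
--     groups = {}
--     for u, v, w in edge_list:
--         groups[u] = groups.get(u, []) + [(v, w)]
--     # precompute per-source summary: (out_degree, (low edge, high/second edge) or None)
--     summary = {}
--     for u, outs in groups.items():
--         d = len(outs)
--         if d == 2:
--             e1, e2 = outs
--             mn = e1 if e1[1] <= e2[1] else e2
--             mx = e2 if e1[1] < e2[1] else e1
--             summary[u] = (d, (mn, mx))
--         elif d == 3:
--             best, second = outs[0], None
--             for e in outs[1:]:
--                 if e[1] < best[1]: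
--                     best, second = e, best
--                 elif second is None or e[1] < second[1]:
--                     second = e
--             summary[u] = (d, (best, second))
--         else:
--             summary[u] = (d, None)
--     # single pass over the original edges, table lookups only
--     res = []
--     for u, v, w in edge_list:
--         d, pair = summary[u]
--         if d == 2:
--             mn, mx = pair
--             if mn[1] == mx[1]:
--                 res.append((u, v, mn[1] + 2))
--             elif mn[0] == v:
--                 res.append((u, v, min(mn[1] + 4, mx[1])))
--             elif mx[0] == v:
--                 res.append((u, v, mx[1] + 2))
--         elif d == 3:
--             mn, mx = pair
--             if mn[1] == mx[1] == w:
--                 res.append((u, v, mn[1] + 1))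
--             elif mn[0] == v:
--                 res.append((u, v, min(mn[1] + 3, mx[1])))
--             elif mx[0] == v:
--                 res.append((u, v, mx[1] + 1))
--             else:
--                 res.append((u, v, w + 1))
--         elif d > 1:
--             res.append((u, v, w))
--     return res
-- ===== Notes on version B (the rewrite author's own statement) =====
-- stated objective: alternative
-- what changed: B builds a per-source summary table once (closed-form min/max for out-degree 2, a single best/second-best fold instead of min-then-deepcopy-remove-then-min for out-degree 3) and then maps the original edge list through table lookups, instead of A's per-edge re-scans of the out-edge list.
import Mathlib
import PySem

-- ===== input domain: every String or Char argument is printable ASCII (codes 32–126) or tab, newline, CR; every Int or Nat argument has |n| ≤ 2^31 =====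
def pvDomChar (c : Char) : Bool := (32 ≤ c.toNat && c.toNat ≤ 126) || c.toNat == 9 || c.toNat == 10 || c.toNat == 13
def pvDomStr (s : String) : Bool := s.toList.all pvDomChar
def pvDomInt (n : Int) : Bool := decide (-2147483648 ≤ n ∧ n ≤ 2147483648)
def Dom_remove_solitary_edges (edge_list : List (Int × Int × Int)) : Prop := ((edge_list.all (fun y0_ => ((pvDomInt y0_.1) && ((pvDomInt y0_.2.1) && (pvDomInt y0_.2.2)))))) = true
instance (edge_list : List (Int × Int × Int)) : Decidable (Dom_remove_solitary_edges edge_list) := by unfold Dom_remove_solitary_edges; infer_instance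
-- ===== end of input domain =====

-- B replaces A's per-edge min/max/deepcopy-remove scans by a per-source summary table built once
-- (closed-form min/max for out-degree 2, a single best/second-best fold for out-degree 3) and one
-- lookup pass over the original edges (objective: alternative; return value only).

-- ===== PORT A =====
-- A's first loop updates the two dicts out_degree / out_edges; one helper per dict.
-- out_edges[u] = out_edges.get(u, list()); out_edges[u].append((v, w))
def pvOeStep (g : PySem.Dict Int (List (Int × Int))) (e : Int × Int × Int) :
    PySem.Dict Int (List (Int × Int)) :=
  let g1 := g.insert e.1 (g.getD e.1 [])
  g1.insert e.1 (g1.getD e.1 [] ++ [(e.2.1, e.2.2)])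

-- out_degree[u] = out_degree.get(u, 0) + 1; out_degree[v] = out_degree.get(v, 0)
def pvOdStep (d : PySem.Dict Int Int) (e : Int × Int × Int) : PySem.Dict Int Int :=
  let d1 := d.insert e.1 (d.getD e.1 0 + 1)
  d1.insert e.2.1 (d1.getD e.2.1 0)

def remove_solitary_edges (edge_list : List (Int × Int × Int)) : List (Int × Int × Int) :=
  let st := edge_list.foldl (fun p e => (pvOdStep p.1 e, pvOeStep p.2 e))
      (PySem.Dict.empty, PySem.Dict.empty)
  let out_degree := st.1
  let out_edges := st.2
  edge_list.foldl (fun acc e =>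
    -- out_degree[edge[0]] / out_edges[edge[0]]: the key is always present (inserted in the first
    -- loop), so Python's d[k] is getD; min over a nonempty list is some, so .getD is exact too.
    if out_degree.getD e.1 0 = 2 then
      let this_out_edges := out_edges.getD e.1 []
      let min_edge := (PySem.List.min? this_out_edges (fun x => x.2)).getD (0, 0)
      let max_edge := (PySem.List.max? this_out_edges (fun x => x.2)).getD (0, 0)
      if min_edge.2 = max_edge.2 then acc ++ [(e.1, e.2.1, min_edge.2 + 2)]
      else if min_edge.1 = e.2.1 then acc ++ [(e.1, e.2.1, min (min_edge.2 + 4) max_edge.2)]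
      else if max_edge.1 = e.2.1 then acc ++ [(e.1, e.2.1, max_edge.2 + 2)]
      else acc
    else if out_degree.getD e.1 0 = 3 then
      let this_out_edges := out_edges.getD e.1 []
      let min_edge := (PySem.List.min? this_out_edges (fun x => x.2)).getD (0, 0)
      -- this_out_edges.remove(min_edge): min_edge ∈ this_out_edges, so remove? is some
      let rest := (PySem.List.remove? this_out_edges min_edge).getD []
      let max_edge := (PySem.List.min? rest (fun x => x.2)).getD (0, 0)
      if min_edge.2 = max_edge.2 ∧ max_edge.2 = e.2.2 then acc ++ [(e.1, e.2.1, min_edge.2 + 1)]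
      else if min_edge.1 = e.2.1 then acc ++ [(e.1, e.2.1, min (min_edge.2 + 3) max_edge.2)]
      else if max_edge.1 = e.2.1 then acc ++ [(e.1, e.2.1, max_edge.2 + 1)]
      else acc ++ [(e.1, e.2.1, e.2.2 + 1)]
    else if 1 < out_degree.getD e.1 0 then acc ++ [e]
    else acc) []

-- ===== PORT B =====
-- groups[u] = groups.setdefault(u, []) + append  (dict grouping pass)
def pvGroup (edge_list : List (Int × Int × Int)) : PySem.Dict Int (List (Int × Int)) :=
  edge_list.foldl (fun g e => g.modify e.1 [] (fun cur => cur ++ [(e.2.1, e.2.2)]))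
    PySem.Dict.empty

-- best/second-best by weight in one fold (Source B's for-loop over outs[1:])
def pvBest3 (e : Int × Int) (rest : List (Int × Int)) : (Int × Int) × Option (Int × Int) :=
  rest.foldl (fun bs e' =>
    if e'.2 < bs.1.2 then (e', some bs.1)
    else match bs.2 with
         | none => (bs.1, some e')
         | some s => if e'.2 < s.2 then (bs.1, some e') else bs) (e, none)

-- _summarize(outs) of Source B: (out-degree, precomputed (low, high/second) pair or None)
def pvSummarize (outs : List (Int × Int)) : Int × Option ((Int × Int) × (Int × Int)) :=
  if outs.length = 2 then
    match outs with
    | e1 :: e2 :: _ =>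
      ((2 : Int), some (if e1.2 ≤ e2.2 then e1 else e2, if e1.2 < e2.2 then e2 else e1))
    | _ => ((2 : Int), none)   -- unreachable: outs has length 2
  else if outs.length = 3 then
    match outs with
    | e :: rest =>
      let bs := pvBest3 e rest
      ((3 : Int), some (bs.1, bs.2.getD (0, 0)))
    | [] => ((3 : Int), none)  -- unreachable: outs has length 3
  else ((outs.length : Int), none)

def remove_solitary_edges_alt (edge_list : List (Int × Int × Int)) : List (Int × Int × Int) :=
  let groups := pvGroup edge_list
  let summary := groups.items.foldl (fun s p => s.insert p.1 (pvSummarize p.2)) PySem.Dict.empty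
  edge_list.foldl (fun acc e =>
    -- summary[u]: key always present (u is a key of groups); default unreachable
    let s := summary.getD e.1 ((0 : Int), none)
    if s.1 = 2 then
      match s.2 with
      | some mnmx =>
        if mnmx.1.2 = mnmx.2.2 then acc ++ [(e.1, e.2.1, mnmx.1.2 + 2)]
        else if mnmx.1.1 = e.2.1 then acc ++ [(e.1, e.2.1, min (mnmx.1.2 + 4) mnmx.2.2)]
        else if mnmx.2.1 = e.2.1 then acc ++ [(e.1, e.2.1, mnmx.2.2 + 2)]
        else acc
      | none => acc            -- unreachable
    else if s.1 = 3 then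
      match s.2 with
      | some mnmx =>
        if mnmx.1.2 = mnmx.2.2 ∧ mnmx.2.2 = e.2.2 then acc ++ [(e.1, e.2.1, mnmx.1.2 + 1)]
        else if mnmx.1.1 = e.2.1 then acc ++ [(e.1, e.2.1, min (mnmx.1.2 + 3) mnmx.2.2)]
        else if mnmx.2.1 = e.2.1 then acc ++ [(e.1, e.2.1, mnmx.2.2 + 1)]
        else acc ++ [(e.1, e.2.1, e.2.2 + 1)]
      | none => acc            -- unreachable
    else if 1 < s.1 then acc ++ [e]
    else acc) []

-- ===== PRECONDITION & SPEC =====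
def Spec_remove_solitary_edges (edge_list : List (Int × Int × Int)) (out : List (Int × Int × Int)) : Prop := out = remove_solitary_edges_alt edge_list
instance (edge_list : List (Int × Int × Int)) (out : List (Int × Int × Int)) : Decidable (Spec_remove_solitary_edges edge_list out) := by unfold Spec_remove_solitary_edges; infer_instance

-- ===== CLAIM (what is proved, stated in full; the proofs are below) =====
def Claim_equal_remove_solitary_edges : Prop := ∀ (edge_list : List (Int × Int × Int)), Dom_remove_solitary_edges edge_list → Spec_remove_solitary_edges edge_list (remove_solitary_edges edge_list)

-- ===== LEMMAS AND PROOFS =====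

-- A's two inserts into out_edges are one modify
theorem pvOe_eq_modify (g : PySem.Dict Int (List (Int × Int))) (e : Int × Int × Int) :
    pvOeStep g e = g.modify e.1 [] (fun cur => cur ++ [(e.2.1, e.2.2)]) := by
  simp [pvOeStep, PySem.Dict.modify, PySem.Dict.getD_insert_self, PySem.Dict.insert_insert_self]

-- out_degree after the first loop counts the out-edges of each node
theorem pv_deg_fold (l : List (Int × Int × Int)) :
    ∀ (d : PySem.Dict Int Int) (x : Int),
      (l.foldl pvOdStep d).getD x 0 = d.getD x 0 + (l.countP (fun e => e.1 == x) : Int) := by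
  induction l with
  | nil => intro d x; simp
  | cons e t ih =>
    intro d x
    rw [List.foldl_cons, ih, List.countP_cons]
    have h : (pvOdStep d e).getD x 0 =
        if x = e.1 then d.getD x 0 + 1 else d.getD x 0 := by
      simp only [pvOdStep, PySem.Dict.getD_insert]
      split_ifs <;> simp_all
    rw [h]
    by_cases hx : e.1 = x
    · simp [hx]; omega
    · have hx' : ¬ x = e.1 := fun hh => hx hh.symm
      simp [hx, hx']

-- out_edges after the grouping loop holds each node's out-edge list in order
theorem pv_grp_fold (l : List (Int × Int × Int)) :
    ∀ (g : PySem.Dict Int (List (Int × Int))) (x : Int),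
      (l.foldl (fun g e => g.modify e.1 [] (fun cur => cur ++ [(e.2.1, e.2.2)])) g).getD x []
        = g.getD x [] ++ (l.filter (fun e => e.1 == x)).map (fun e => (e.2.1, e.2.2)) := by
  induction l with
  | nil => intro g x; simp
  | cons e t ih =>
    intro g x
    rw [List.foldl_cons, ih, PySem.Dict.getD_modify, List.filter_cons]
    by_cases hx : x = e.1 <;> by_cases hx' : (e.1 == x) = true <;>
      simp_all

theorem pv_nodup_group (l : List (Int × Int × Int)) : (pvGroup l).keys.Nodup :=
  PySem.Dict.nodup_keys_foldl_modify_key l (fun e => e.1) []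
    (fun _ e => (fun cur => cur ++ [(e.2.1, e.2.2)])) PySem.Dict.empty
    PySem.Dict.nodup_keys_empty

-- the summary table maps every node to the summary of its out-edge list
theorem pv_summary_getD (l : List (Int × Int × Int)) (u : Int) :
    ((pvGroup l).items.foldl (fun s p => s.insert p.1 (pvSummarize p.2))
        PySem.Dict.empty).getD u ((0 : Int), none)
      = pvSummarize ((pvGroup l).getD u []) := by
  have hnd := pv_nodup_group l
  have hkeys : (List.map (fun p => p.1) (pvGroup l).items).Nodup := by
    simpa [PySem.Dict.keys] using hnd
  have hitems := PySem.Dict.items_foldl_insert_fresh (pvGroup l).items (fun p => p.1)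
    (fun p => pvSummarize p.2) PySem.Dict.empty
    (fun a _ => PySem.Dict.contains_empty _) hkeys
  have hnd' : ((pvGroup l).items.foldl (fun s p => s.insert p.1 (pvSummarize p.2))
      PySem.Dict.empty).keys.Nodup := by
    simpa [PySem.Dict.keys, hitems, List.map_map, Function.comp_def] using hnd
  cases hq : (pvGroup l).get? u with
  | none =>
    have hgD : (pvGroup l).getD u [] = [] := by
      rw [PySem.Dict.getD_eq_get?_getD, hq]; rfl
    have hempty : (PySem.Dict.empty :
        PySem.Dict Int (Int × Option ((Int × Int) × (Int × Int)))).items = [] := rfl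
    have hnotmem : ∀ v, (u, v) ∉ ((pvGroup l).items.foldl
        (fun s p => s.insert p.1 (pvSummarize p.2)) PySem.Dict.empty).items := by
      intro v hv
      rw [hitems, hempty, List.nil_append, List.mem_map] at hv
      obtain ⟨p, hp, hpe⟩ := hv
      have hq' : (pvGroup l).get? p.1 = some p.2 :=
        (PySem.Dict.get?_eq_some_iff_mem_items _ _ _ hnd).mpr (by simpa using hp)
      have hp1 : p.1 = u := congrArg Prod.fst hpe
      rw [hp1, hq] at hq'
      cases hq'
    rw [PySem.Dict.getD_eq_get?_getD]
    cases hq2 : ((pvGroup l).items.foldl (fun s p => s.insert p.1 (pvSummarize p.2))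
        PySem.Dict.empty).get? u with
    | none => simp [hgD, pvSummarize]
    | some v => exact absurd (PySem.Dict.mem_items_of_get?_eq_some _ hq2) (hnotmem v)
  | some outs =>
    have hgD : (pvGroup l).getD u [] = outs := by
      rw [PySem.Dict.getD_eq_get?_getD, hq]; rfl
    have hmem : (u, outs) ∈ (pvGroup l).items := PySem.Dict.mem_items_of_get?_eq_some _ hq
    have hmem' : (u, pvSummarize outs) ∈ ((pvGroup l).items.foldl
        (fun s p => s.insert p.1 (pvSummarize p.2)) PySem.Dict.empty).items := by
      have hempty : (PySem.Dict.empty :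
          PySem.Dict Int (Int × Option ((Int × Int) × (Int × Int)))).items = [] := rfl
      rw [hitems, hempty, List.nil_append, List.mem_map]
      exact ⟨(u, outs), hmem, rfl⟩
    rw [hgD, PySem.Dict.getD_of_mem_items _ hmem' hnd']

-- A's min/max on a two-element out-edge list are B's closed forms
theorem pv_min2 (a b : Int × Int) :
    (PySem.List.min? [a, b] (fun x => x.2)).getD (0, 0) = (if a.2 ≤ b.2 then a else b) := by
  simp only [PySem.List.min?, List.foldl]
  split_ifs <;> simp_all
  omega

theorem pv_max2 (a b : Int × Int) :
    (PySem.List.max? [a, b] (fun x => x.2)).getD (0, 0) = (if a.2 < b.2 then b else a) := by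
  simp only [PySem.List.max?, List.foldl]
  split_ifs <;> simp_all

-- A's min-then-remove-then-min on a three-element list is B's best/second-best fold
set_option maxHeartbeats 2000000 in
theorem pv_minmax3 (a b c : Int × Int) :
    ((PySem.List.min? [a, b, c] (fun x => x.2)).getD (0, 0),
     (PySem.List.min? ((PySem.List.remove? [a, b, c]
        ((PySem.List.min? [a, b, c] (fun x => x.2)).getD (0, 0))).getD [])
        (fun x => x.2)).getD (0, 0))
    = ((pvBest3 a [b, c]).1, (pvBest3 a [b, c]).2.getD (0, 0)) := by
  simp only [pvBest3, PySem.List.min?, PySem.List.remove?, List.foldl, List.idxOf?_cons,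
    List.idxOf?_nil]
  split_ifs <;> simp_all
  all_goals try (split_ifs <;> simp_all)
  all_goals try omega

-- the per-edge branch logic agrees once degree, out-edge list and summary are in place
theorem pv_body_eq (acc : List (Int × Int × Int)) (u v w : Int) (outs : List (Int × Int)) :
    (if ((outs.length : Int)) = 2 then
      let this_out_edges := outs
      let min_edge := (PySem.List.min? this_out_edges (fun x => x.2)).getD (0, 0)
      let max_edge := (PySem.List.max? this_out_edges (fun x => x.2)).getD (0, 0)
      if min_edge.2 = max_edge.2 then acc ++ [(u, v, min_edge.2 + 2)]
      else if min_edge.1 = v then acc ++ [(u, v, min (min_edge.2 + 4) max_edge.2)]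
      else if max_edge.1 = v then acc ++ [(u, v, max_edge.2 + 2)]
      else acc
    else if ((outs.length : Int)) = 3 then
      let this_out_edges := outs
      let min_edge := (PySem.List.min? this_out_edges (fun x => x.2)).getD (0, 0)
      let rest := (PySem.List.remove? this_out_edges min_edge).getD []
      let max_edge := (PySem.List.min? rest (fun x => x.2)).getD (0, 0)
      if min_edge.2 = max_edge.2 ∧ max_edge.2 = w then acc ++ [(u, v, min_edge.2 + 1)]
      else if min_edge.1 = v then acc ++ [(u, v, min (min_edge.2 + 3) max_edge.2)]
      else if max_edge.1 = v then acc ++ [(u, v, max_edge.2 + 1)]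
      else acc ++ [(u, v, w + 1)]
    else if 1 < ((outs.length : Int)) then acc ++ [(u, v, w)]
    else acc)
    =
    (let s := pvSummarize outs
     if s.1 = 2 then
      match s.2 with
      | some mnmx =>
        if mnmx.1.2 = mnmx.2.2 then acc ++ [(u, v, mnmx.1.2 + 2)]
        else if mnmx.1.1 = v then acc ++ [(u, v, min (mnmx.1.2 + 4) mnmx.2.2)]
        else if mnmx.2.1 = v then acc ++ [(u, v, mnmx.2.2 + 2)]
        else acc
      | none => acc
     else if s.1 = 3 then
      match s.2 with
      | some mnmx =>
        if mnmx.1.2 = mnmx.2.2 ∧ mnmx.2.2 = w then acc ++ [(u, v, mnmx.1.2 + 1)]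
        else if mnmx.1.1 = v then acc ++ [(u, v, min (mnmx.1.2 + 3) mnmx.2.2)]
        else if mnmx.2.1 = v then acc ++ [(u, v, mnmx.2.2 + 1)]
        else acc ++ [(u, v, w + 1)]
      | none => acc
     else if 1 < s.1 then acc ++ [(u, v, w)]
     else acc) := by
  match outs with
  | [] => norm_num [pvSummarize]
  | [p] => norm_num [pvSummarize]
  | [p, q] =>
    simp only [pvSummarize, List.length_cons, List.length_nil]
    norm_num [pv_min2 p q, pv_max2 p q]
  | [p, q, r] =>
    have h1 := congrArg Prod.fst (pv_minmax3 p q r)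
    have h2 := congrArg Prod.snd (pv_minmax3 p q r)
    simp only at h1 h2
    simp only [pvSummarize, List.length_cons, List.length_nil]
    norm_num
    rw [← h2, ← h1]
  | p :: q :: r :: s :: t =>
    have hlen : ¬ ((((p :: q :: r :: s :: t).length : Int)) = 2) := by
      simp; omega
    have hlen3 : ¬ ((((p :: q :: r :: s :: t).length : Int)) = 3) := by
      simp; omega
    have hlen1 : 1 < (((p :: q :: r :: s :: t).length : Int)) := by
      simp; omega
    simp only [pvSummarize]
    rw [if_neg hlen, if_neg hlen3, if_pos hlen1]
    have hl2 : ¬ ((p :: q :: r :: s :: t).length = 2) := by simp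
    have hl3 : ¬ ((p :: q :: r :: s :: t).length = 3) := by simp
    rw [if_neg hl2, if_neg hl3]
    simp only []
    rw [if_neg hlen, if_neg hlen3, if_pos hlen1]

-- ===== VERDICT (by name: the statement is the Claim_ definition above) =====
theorem remove_solitary_edges_spec : Claim_equal_remove_solitary_edges := by
  intro l _hdom
  unfold Spec_remove_solitary_edges remove_solitary_edges remove_solitary_edges_alt
  rw [PySem.List.foldl_prod_mk (f := pvOdStep) (g := pvOeStep)]
  apply PySem.List.foldl_congr_mem
  intro acc e he
  obtain ⟨u, v, w⟩ := e
  have hoeA : (l.foldl pvOeStep PySem.Dict.empty) =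
      (l.foldl (fun g e => g.modify e.1 [] (fun cur => cur ++ [(e.2.1, e.2.2)]))
        PySem.Dict.empty) :=
    PySem.List.foldl_congr_mem _ _ _ _ (fun acc x _ => pvOe_eq_modify acc x)
  have houts : (l.foldl pvOeStep PySem.Dict.empty).getD u []
      = (l.filter (fun e => e.1 == u)).map (fun e => (e.2.1, e.2.2)) := by
    rw [hoeA, pv_grp_fold]
    simp
  have hdeg : (l.foldl pvOdStep PySem.Dict.empty).getD u 0
      = ((((l.filter (fun e => e.1 == u)).map (fun e => (e.2.1, e.2.2))).length : Int)) := by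
    rw [pv_deg_fold]
    simp [List.countP_eq_length_filter]
  have hsum := pv_summary_getD l u
  have hgrp : (pvGroup l).getD u []
      = (l.filter (fun e => e.1 == u)).map (fun e => (e.2.1, e.2.2)) := by
    unfold pvGroup
    rw [pv_grp_fold]
    simp
  simp only [hdeg, houts, hsum, hgrp]
  exact pv_body_eq acc u v w _
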